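-- pv_equiv track=rewrite | github.com/minahilahmadsiddiqui/Chatbot | chatbot/services/rag_service.py | _strong_focus_terms
-- ===== SOURCE A (Python) =====
-- _GENERIC_QUERY_TERMS = {
--     "explain",
--     "describe",
--     "tell",
--     "summarize",
--     "summarise",
--     "show",
--     "give",
--     "provide",
--     "please",
--     "kindly",
--     "something",
--     "anything",
--     "everything",
--     "just",
--     "also",
--     "really",
--     "very",
-- }
--
-- _WEAK_FOCUS_TERMS = frozenset(
--     {
--         "allowed",
--         "allow",
--         "allows",
--         "use",
--         "using",
--         "used",
--         "personal",
--         "phone",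
--         "phones",
--         "cell",
--         "limited",
--         "please",
--         "make",
--         "sure",
--         "however",
--         "also",
--         "same",
--         "other",
--         "any",
--         "some",
--         "such",
--         "salary",
--         "salaries",
--         "people",
--         "efficiency",
--         "efficient",
--         "proportional",
--         "company",
--         "companies",
--         "work",
--         "working",
--         "workplace",
--     }
-- )
--
-- def _strong_focus_terms(terms: set[str]) -> set[str]:
--     """
--     Subset of query terms that are specific enough to anchor strict extraction.
--     Weak terms alone match unrelated policy lines (e.g. "allowed", "many").
--     """
--     if not terms:
--         return set()
--     weak = _WEAK_FOCUS_TERMS | _GENERIC_QUERY_TERMS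
--     strong = {t for t in terms if t not in weak and len(t) >= 3}
--     if not strong:
--         strong = {t for t in terms if t not in weak and len(t) >= 2}
--     if not strong:
--         strong = set(terms)
--     return strong
-- ===== SOURCE B (Python) =====
-- _GENERIC_QUERY_TERMS = {
--     "explain", "describe", "tell", "summarize", "summarise", "show", "give",
--     "provide", "please", "kindly", "something", "anything", "everything",
--     "just", "also", "really", "very",
-- }
--
-- _WEAK_FOCUS_TERMS = frozenset(
--     {
--         "allowed", "allow", "allows", "use", "using", "used", "personal",
--         "phone", "phones", "cell", "limited", "please", "make", "sure",
--         "however", "also", "same", "other", "any", "some", "such", "salary",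
--         "salaries", "people", "efficiency", "efficient", "proportional",
--         "company", "companies", "work", "working", "workplace",
--     }
-- )
--
-- _WEAK = _WEAK_FOCUS_TERMS | _GENERIC_QUERY_TERMS
--
--
-- def _rank(t):
--     # Anchoring strength of a single term: 3 strong, 2 borderline, 1 weak.
--     if t in _WEAK or len(t) < 2:
--         return 1
--     return 3 if len(t) >= 3 else 2
--
--
-- def _strong_focus_terms(terms: set[str]) -> set[str]:
--     # Score every term and keep the top-rank class (argmax formulation:
--     # no staged filters or emptiness fallbacks).
--     if not terms:
--         return set()
--     best = max(map(_rank, terms))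
--     return {t for t in terms if _rank(t) == best}
-- ===== Notes on version B (the rewrite author's own statement) =====
-- stated objective: alternative
-- what changed: Replaces A's staged filter-with-fallback chain (len>=3 filter, then len>=2 filter if empty, then all terms) by an argmax-class formulation: every term gets a rank (3 strong, 2 borderline, 1 weak), the maximum rank is computed once, and the terms of the top rank class are returned.
import Mathlib
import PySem

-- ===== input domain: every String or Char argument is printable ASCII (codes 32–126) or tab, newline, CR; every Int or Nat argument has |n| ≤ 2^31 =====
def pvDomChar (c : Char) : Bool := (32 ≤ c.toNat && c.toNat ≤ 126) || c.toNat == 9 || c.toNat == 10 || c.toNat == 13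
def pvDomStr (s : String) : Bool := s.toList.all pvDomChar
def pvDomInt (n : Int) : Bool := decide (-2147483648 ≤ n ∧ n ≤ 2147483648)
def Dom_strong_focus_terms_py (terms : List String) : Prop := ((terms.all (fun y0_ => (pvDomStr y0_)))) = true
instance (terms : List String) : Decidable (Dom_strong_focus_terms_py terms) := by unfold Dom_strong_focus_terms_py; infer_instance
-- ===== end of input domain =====

-- B replaces A's staged filter-with-fallback chain by an argmax-class formulation:
-- rank every term (3/2/1), then keep the top-rank class (objective: alternative).

-- ===== PORT A =====
def pvGenericQueryTerms : PySem.Set String :=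
  PySem.Set.ofList ["explain", "describe", "tell", "summarize", "summarise", "show", "give",
    "provide", "please", "kindly", "something", "anything", "everything",
    "just", "also", "really", "very"]

def pvWeakFocusTerms : PySem.Set String :=
  PySem.Set.ofList ["allowed", "allow", "allows", "use", "using", "used", "personal",
    "phone", "phones", "cell", "limited", "please", "make", "sure",
    "however", "also", "same", "other", "any", "some", "such", "salary",
    "salaries", "people", "efficiency", "efficient", "proportional",
    "company", "companies", "work", "working", "workplace"]

-- weak = _WEAK_FOCUS_TERMS | _GENERIC_QUERY_TERMS
def pvWeak : PySem.Set String := PySem.Set.union pvWeakFocusTerms pvGenericQueryTerms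

-- {t for t in terms if t not in weak and len(t) >= 3}
def pvStrong3 (terms : List String) : PySem.Set String :=
  PySem.Set.ofList (terms.filter (fun t => !(PySem.Set.contains pvWeak t) && decide (3 ≤ PySem.Str.len t)))

-- {t for t in terms if t not in weak and len(t) >= 2}
def pvStrong2 (terms : List String) : PySem.Set String :=
  PySem.Set.ofList (terms.filter (fun t => !(PySem.Set.contains pvWeak t) && decide (2 ≤ PySem.Str.len t)))

-- A's sequential reassignments of `strong`, written as the equivalent nested selection.
def strong_focus_terms_py (terms : List String) : List String :=
  if terms = [] then []
  else if pvStrong3 terms = [] then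
    (if pvStrong2 terms = [] then PySem.Set.ofList terms else pvStrong2 terms)
  else pvStrong3 terms

-- ===== PORT B =====
-- _rank(t): 1 if weak or len < 2, else 3 if len >= 3, else 2.
def pvRank (t : String) : Int :=
  if PySem.Set.contains pvWeak t = true ∨ PySem.Str.len t < 2 then 1
  else if 3 ≤ PySem.Str.len t then 3 else 2

-- best = max(map(_rank, terms))  (terms non-empty)
def pvBest (l : List String) (m : Int) : Int := l.foldl (fun a x => max a (pvRank x)) m

def strong_focus_terms_py_alt (terms : List String) : List String :=
  match terms with
  | [] => []
  | t :: ts =>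
    let best := pvBest ts (pvRank t)
    PySem.Set.ofList ((t :: ts).filter (fun x => decide (pvRank x = best)))

-- ===== PRECONDITION & SPEC =====
def Spec_strong_focus_terms_py (terms : List String) (out : List String) : Prop := out = strong_focus_terms_py_alt terms
instance (terms : List String) (out : List String) : Decidable (Spec_strong_focus_terms_py terms out) := by unfold Spec_strong_focus_terms_py; infer_instance

-- ===== CLAIM (what is proved, stated in full; the proofs are below) =====
def Claim_equal_strong_focus_terms_py : Prop := ∀ (terms : List String), Dom_strong_focus_terms_py terms → Spec_strong_focus_terms_py terms (strong_focus_terms_py terms)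

-- ===== LEMMAS AND PROOFS =====

theorem pv_rank_cases (x : String) : pvRank x = 1 ∨ pvRank x = 2 ∨ pvRank x = 3 := by
  unfold pvRank; split_ifs <;> simp

theorem pv_rank3_iff (x : String) :
    pvRank x = 3 ↔ (PySem.Set.contains pvWeak x = false ∧ 3 ≤ PySem.Str.len x) := by
  unfold pvRank
  split_ifs with h1 h2
  · constructor
    · intro h; omega
    · rintro ⟨hw, hl⟩
      rcases h1 with h1 | h1
      · rw [hw] at h1; cases h1
      · omega
  · push Not at h1
    exact ⟨fun _ => ⟨Bool.not_eq_true _ ▸ (by simpa using h1.1), h2⟩, fun _ => rfl⟩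
  · constructor
    · intro h; omega
    · rintro ⟨_, hl⟩; exact absurd hl h2

theorem pv_rank2_iff (x : String) :
    pvRank x = 2 ↔ (PySem.Set.contains pvWeak x = false ∧ PySem.Str.len x = 2) := by
  unfold pvRank
  split_ifs with h1 h2
  · constructor
    · intro h; omega
    · rintro ⟨hw, hl⟩
      rcases h1 with h1 | h1
      · rw [hw] at h1; cases h1
      · omega
  · constructor
    · intro h; omega
    · rintro ⟨_, hl⟩; omega
  · push Not at h1
    refine ⟨fun _ => ⟨by simpa using h1.1, ?_⟩, fun _ => rfl⟩
    have := h1.2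
    omega

theorem pvBest_nil (m : Int) : pvBest [] m = m := by
  simp [pvBest]

theorem pvBest_cons (x : String) (xs : List String) (m : Int) :
    pvBest (x :: xs) m = pvBest xs (max m (pvRank x)) := by
  simp [pvBest, List.foldl_cons]

theorem pv_best_ge (l : List String) : ∀ (m : Int), m ≤ pvBest l m := by
  induction l with
  | nil => intro m; rw [pvBest_nil]
  | cons x xs ih =>
    intro m
    rw [pvBest_cons]
    exact le_trans (le_max_left m (pvRank x)) (ih (max m (pvRank x)))

theorem pv_best_ge_mem (l : List String) (x : String) :
    ∀ (m : Int), x ∈ l → pvRank x ≤ pvBest l m := by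
  induction l with
  | nil => intro m hx; cases hx
  | cons y ys ih =>
    intro m hx
    rcases List.mem_cons.mp hx with h | h
    · subst h
      rw [pvBest_cons]
      exact le_trans (le_max_right m (pvRank x)) (pv_best_ge ys _)
    · rw [pvBest_cons]
      exact ih _ h

theorem pv_best_attained (l : List String) :
    ∀ (m : Int), pvBest l m = m ∨ ∃ x ∈ l, pvRank x = pvBest l m := by
  induction l with
  | nil => intro m; left; rw [pvBest_nil]
  | cons y ys ih =>
    intro m
    rw [pvBest_cons]
    rcases ih (max m (pvRank y)) with h | ⟨x, hx, hr⟩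
    · rcases max_cases m (pvRank y) with ⟨he, _⟩ | ⟨he, _⟩
      · left; rw [h, he]
      · right
        exact ⟨y, List.mem_cons_self, by rw [h, he]⟩
    · right; exact ⟨x, List.mem_cons_of_mem _ hx, hr⟩

-- filter by "non-weak and len ≥ 3" is filter by "rank = 3"
theorem pv_filter3_eq (terms : List String) :
    terms.filter (fun t => !(PySem.Set.contains pvWeak t) && decide (3 ≤ PySem.Str.len t))
    = terms.filter (fun t => decide (pvRank t = 3)) := by
  apply List.filter_congr
  intro x _
  rw [Bool.eq_iff_iff]
  simp only [Bool.and_eq_true, Bool.not_eq_true', decide_eq_true_eq]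
  rw [pv_rank3_iff]

-- with no rank-3 term, A's len ≥ 2 filter is the rank = 2 filter
theorem pv_filter2_eq (terms : List String)
    (h : ∀ x ∈ terms, pvRank x ≠ 3) :
    terms.filter (fun t => !(PySem.Set.contains pvWeak t) && decide (2 ≤ PySem.Str.len t))
    = terms.filter (fun t => decide (pvRank t = 2)) := by
  apply List.filter_congr
  intro x hx
  rw [Bool.eq_iff_iff]
  simp only [Bool.and_eq_true, Bool.not_eq_true', decide_eq_true_eq]
  rw [pv_rank2_iff]
  constructor
  · rintro ⟨hw, hl⟩
    refine ⟨hw, ?_⟩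
    have h3 : ¬ (3 ≤ PySem.Str.len x) :=
      fun hc => h x hx ((pv_rank3_iff x).mpr ⟨hw, hc⟩)
    omega
  · rintro ⟨hw, hl⟩; exact ⟨hw, by omega⟩

theorem pv_ofList_ne_nil (l : List String) (h : l ≠ []) : PySem.Set.ofList l ≠ [] := by
  obtain ⟨x, hx⟩ := List.exists_mem_of_ne_nil _ h
  exact List.ne_nil_of_mem ((PySem.Set.mem_ofList _ _).mpr hx)

-- ===== VERDICT (by name: the statement is the Claim_ definition above) =====
theorem strong_focus_terms_py_spec : Claim_equal_strong_focus_terms_py := by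
  intro terms _
  unfold Spec_strong_focus_terms_py strong_focus_terms_py strong_focus_terms_py_alt
  match terms with
  | [] => simp
  | t :: ts =>
    simp only [reduceCtorEq, if_false]
    set best := pvBest ts (pvRank t) with hbest
    have hmem_le : ∀ x ∈ t :: ts, pvRank x ≤ best := by
      intro x hx
      rcases List.mem_cons.mp hx with h | h
      · subst h; exact pv_best_ge _ _
      · exact pv_best_ge_mem _ _ _ h
    have hatt : ∃ x ∈ t :: ts, pvRank x = best := by
      rcases pv_best_attained ts (pvRank t) with h | ⟨x, hx, hr⟩
      · exact ⟨t, List.mem_cons_self, h.symm⟩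
      · exact ⟨x, List.mem_cons_of_mem _ hx, hr⟩
    by_cases h3 : pvStrong3 (t :: ts) = []
    · rw [if_pos h3]
      have hf3 : (t :: ts).filter (fun x => !(PySem.Set.contains pvWeak x) && decide (3 ≤ PySem.Str.len x)) = [] := by
        by_contra hc
        exact pv_ofList_ne_nil _ hc h3
      have hno3 : ∀ x ∈ t :: ts, pvRank x ≠ 3 := by
        intro x hx hc
        have hm : x ∈ (t :: ts).filter (fun x => !(PySem.Set.contains pvWeak x) && decide (3 ≤ PySem.Str.len x)) := by
          rw [pv_filter3_eq]
          exact List.mem_filter.mpr ⟨hx, by simp [hc]⟩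
        rw [hf3] at hm
        cases hm
      by_cases h2 : pvStrong2 (t :: ts) = []
      · rw [if_pos h2]
        have hf2 : (t :: ts).filter (fun x => !(PySem.Set.contains pvWeak x) && decide (2 ≤ PySem.Str.len x)) = [] := by
          by_contra hc
          exact pv_ofList_ne_nil _ hc h2
        have hno2 : ∀ x ∈ t :: ts, pvRank x ≠ 2 := by
          intro x hx hc
          have hm : x ∈ (t :: ts).filter (fun x => !(PySem.Set.contains pvWeak x) && decide (2 ≤ PySem.Str.len x)) := by
            rw [pv_filter2_eq _ hno3]
            exact List.mem_filter.mpr ⟨hx, by simp [hc]⟩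
          rw [hf2] at hm
          cases hm
        have hall1 : ∀ x ∈ t :: ts, pvRank x = 1 := by
          intro x hx
          rcases pv_rank_cases x with h | h | h
          · exact h
          · exact absurd h (hno2 x hx)
          · exact absurd h (hno3 x hx)
        have hb1 : best = 1 := by
          obtain ⟨x, hx, hr⟩ := hatt
          rw [← hr, hall1 x hx]
        have hself : (t :: ts).filter (fun x => decide (pvRank x = best)) = t :: ts := by
          apply List.filter_eq_self.mpr
          intro x hx
          simp [hall1 x hx, hb1]
        rw [hself]
      · rw [if_neg h2]
        have h2' : (t :: ts).filter (fun x => !(PySem.Set.contains pvWeak x) && decide (2 ≤ PySem.Str.len x)) ≠ [] := by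
          intro hc
          apply h2
          unfold pvStrong2
          rw [hc]
          rfl
        have hex2 : ∃ x ∈ t :: ts, pvRank x = 2 := by
          obtain ⟨x, hx⟩ := List.exists_mem_of_ne_nil _ h2'
          rw [pv_filter2_eq _ hno3] at hx
          have hx' := List.mem_filter.mp hx
          exact ⟨x, hx'.1, by simpa using hx'.2⟩
        have hb2 : best = 2 := by
          obtain ⟨x, hx, hr⟩ := hex2
          obtain ⟨y, hy, hry⟩ := hatt
          have hle := hmem_le x hx
          rcases pv_rank_cases y with h | h | h
          · omega
          · omega
          · exact absurd h (hno3 y hy)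
        unfold pvStrong2
        rw [hb2, ← pv_filter2_eq _ hno3]
    · rw [if_neg h3]
      have h3' : (t :: ts).filter (fun x => !(PySem.Set.contains pvWeak x) && decide (3 ≤ PySem.Str.len x)) ≠ [] := by
        intro hc
        apply h3
        unfold pvStrong3
        rw [hc]
        rfl
      have hex3 : ∃ x ∈ t :: ts, pvRank x = 3 := by
        obtain ⟨x, hx⟩ := List.exists_mem_of_ne_nil _ h3'
        rw [pv_filter3_eq] at hx
        have hx' := List.mem_filter.mp hx
        exact ⟨x, hx'.1, by simpa using hx'.2⟩
      have hb3 : best = 3 := by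
        obtain ⟨x, hx, hr⟩ := hex3
        obtain ⟨y, hy, hry⟩ := hatt
        have hle := hmem_le x hx
        rcases pv_rank_cases y with h | h | h <;> omega
      unfold pvStrong3
      rw [hb3, ← pv_filter3_eq]
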